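-- pv_equiv track=rewrite | github.com/fyliav/for_1500_yuan_for_a_night | patch_br/find_br_if.py | move_none_to_end
-- ===== SOURCE A (Python) =====
-- def move_none_to_end(arr: list) -> list:
--     result = arr.copy()
--     non_none_pos = 0
--     for i in range(len(result)):
--         if result[i] is not None:
--             result[non_none_pos], result[i] = result[i], result[non_none_pos]
--             non_none_pos += 1
--     return result
-- ===== SOURCE B (Python) =====
-- def move_none_to_end(arr: list) -> list:
--     kept = [x for x in arr if x is not None]
--     return kept + [None] * (len(arr) - len(kept))
-- ===== Notes on version B (the rewrite author's own statement) =====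
-- stated objective: simpler
-- what changed: Replaces the in-place two-pointer swap partition with a two-phase filter-then-pad: keep the non-None elements in one pass, then append the missing count of Nones.
import Mathlib
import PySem

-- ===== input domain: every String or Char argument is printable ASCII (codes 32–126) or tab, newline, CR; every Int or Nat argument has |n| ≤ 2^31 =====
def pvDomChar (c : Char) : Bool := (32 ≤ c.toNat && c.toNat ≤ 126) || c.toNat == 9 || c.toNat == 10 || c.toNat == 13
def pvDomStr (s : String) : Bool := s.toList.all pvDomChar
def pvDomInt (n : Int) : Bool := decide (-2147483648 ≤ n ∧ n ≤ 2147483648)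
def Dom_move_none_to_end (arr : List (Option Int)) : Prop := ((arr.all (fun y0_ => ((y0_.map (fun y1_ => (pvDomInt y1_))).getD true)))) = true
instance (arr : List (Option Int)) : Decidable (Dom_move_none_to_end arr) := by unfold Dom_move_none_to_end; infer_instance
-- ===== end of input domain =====

-- B replaces A's in-place two-pointer swap partition with a two-phase filter-then-pad (simpler);
-- A copies its argument before mutating, so return-value equivalence is the whole story.

-- ===== PORT A =====
-- one iteration of A's loop body: state is (result, non_none_pos), i the loop index
-- (indices i and non_none_pos are always in range, so list indexing is ported with getD)
def pvStepA (s : List (Option Int) × Nat) (i : Nat) : List (Option Int) × Nat :=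
  let r := s.1
  let p := s.2
  let a := r.getD i none          -- result[i]
  if a.isSome then                -- "result[i] is not None"
    let b := r.getD p none        -- result[non_none_pos]  (RHS of the tuple swap, read before writing)
    ((r.set p a).set i b, p + 1)
  else s

def move_none_to_end (arr : List (Option Int)) : List (Option Int) :=
  let result := arr               -- arr.copy(): lists are immutable in Lean
  ((List.range result.length).foldl pvStepA (result, 0)).1

-- ===== PORT B =====
def move_none_to_end_alt (arr : List (Option Int)) : List (Option Int) :=
  let kept := arr.filter (fun x => x.isSome)               -- [x for x in arr if x is not None]
  kept ++ List.replicate (arr.length - kept.length) none   -- kept + [None] * (len(arr) - len(kept))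

-- ===== PRECONDITION & SPEC =====
def Spec_move_none_to_end (arr : List (Option Int)) (out : List (Option Int)) : Prop := out = move_none_to_end_alt arr
instance (arr : List (Option Int)) (out : List (Option Int)) : Decidable (Spec_move_none_to_end arr out) := by unfold Spec_move_none_to_end; infer_instance

-- ===== CLAIM (what is proved, stated in full; the proofs are below) =====
def Claim_equal_move_none_to_end : Prop := ∀ (arr : List (Option Int)), Dom_move_none_to_end arr → Spec_move_none_to_end arr (move_none_to_end arr)

-- ===== LEMMAS AND PROOFS =====

theorem pv_set_append (l l' : List (Option Int)) (i : Nat) (x : Option Int) :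
    (l ++ l').set (l.length + i) x = l ++ l'.set i x := by
  induction l with
  | nil => simp
  | cons a t ih => simp [Nat.succ_add, ih]

theorem pv_getD_append (l l' : List (Option Int)) (i : Nat) (d : Option Int) :
    (l ++ l').getD (l.length + i) d = l'.getD i d := by
  induction l with
  | nil => simp
  | cons a t ih => simpa [List.getD, Nat.succ_add] using ih

-- what one loop iteration of A does to a list of the invariant's shape:
-- kept prefix F, m parked Nones, current element x, untouched tail T
theorem pv_getD_repl (m : Nat) (l : List (Option Int)) (d : Option Int) :
    (List.replicate m (none : Option Int) ++ l).getD m d = l.getD 0 d := by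
  induction m with
  | zero => rfl
  | succ m ih =>
    rw [List.replicate_succ, List.cons_append, List.getD_cons_succ]
    exact ih

theorem pv_set_repl (m : Nat) (l : List (Option Int)) (x : Option Int) :
    (List.replicate m (none : Option Int) ++ l).set m x
      = List.replicate m (none : Option Int) ++ l.set 0 x := by
  induction m with
  | zero => rfl
  | succ m ih =>
    rw [List.replicate_succ, List.cons_append, List.set_cons_succ, ih]
    simp

theorem pvStepA_shape (F T : List (Option Int)) (m i : Nat) (x : Option Int)
    (hi : i = F.length + m) :
    pvStepA (F ++ (List.replicate m none ++ x :: T), F.length) i =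
      if x.isSome then ((F ++ [x]) ++ (List.replicate m none ++ T), F.length + 1)
      else (F ++ (List.replicate (m + 1) none ++ T), F.length) := by
  subst hi
  have ha : (F ++ (List.replicate m none ++ x :: T)).getD (F.length + m) none = x := by
    rw [pv_getD_append, pv_getD_repl]; rfl
  by_cases hx : x.isSome
  · rw [if_pos hx]
    cases m with
    | zero =>
      have hb : (F ++ (List.replicate 0 none ++ x :: T)).getD (F.length + 0) none = x := by
        rw [pv_getD_append]; rfl
      have hset : (F ++ (List.replicate 0 none ++ x :: T)).set (F.length + 0) x
          = F ++ (List.replicate 0 none ++ x :: T) := by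
        rw [pv_set_append]; rfl
      simp only [pvStepA, Nat.add_zero] at *
      rw [ha, if_pos hx, hset, hset]
      simp
    | succ m =>
      have hb : (F ++ (List.replicate (m + 1) none ++ x :: T)).getD (F.length + 0) none
          = none := by
        rw [pv_getD_append]; simp [List.replicate_succ, List.getD]
      have hsetp : (F ++ (List.replicate (m + 1) none ++ x :: T)).set (F.length + 0) x
          = F ++ (x :: (List.replicate m none ++ x :: T)) := by
        rw [pv_set_append]; simp [List.replicate_succ]
      have hsetk : (F ++ (x :: (List.replicate m none ++ x :: T))).set (F.length + (m + 1)) none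
          = (F ++ [x]) ++ (List.replicate m none ++ none :: T) := by
        have e1 : F ++ (x :: (List.replicate m none ++ x :: T))
            = (F ++ [x]) ++ (List.replicate m none ++ x :: T) := by simp
        have e2 : F.length + (m + 1) = (F ++ [x]).length + m := by simp; omega
        rw [e1, e2, pv_set_append, pv_set_repl]; rfl
      simp only [pvStepA] at *
      rw [ha, if_pos hx]
      simp only [Nat.add_zero] at hb hsetp
      rw [hb, hsetp, hsetk]
      have : List.replicate m (none : Option Int) ++ none :: T
          = List.replicate (m + 1) none ++ T := by
        simp [List.replicate_succ' (n := m)]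
      rw [this]
  · rw [if_neg hx]
    have hxn : x = none := Option.not_isSome_iff_eq_none.mp (by simpa using hx)
    simp only [pvStepA] at *
    rw [ha, if_neg hx]
    have : List.replicate m (none : Option Int) ++ x :: T
        = List.replicate (m + 1) none ++ T := by
      simp [hxn, List.replicate_succ' (n := m)]
    rw [this]

-- the loop invariant: after processing indices 0..k-1, the list is
-- (non-None elements of the first k, in order) ++ (the displaced Nones) ++ (the untouched tail),
-- and non_none_pos counts the kept elements.
theorem pv_loop_inv (arr : List (Option Int)) (k : Nat) (hk : k ≤ arr.length) :
    (List.range k).foldl pvStepA (arr, 0) =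
      ((arr.take k).filter (fun x => x.isSome)
         ++ (List.replicate (k - ((arr.take k).filter (fun x => x.isSome)).length) none
         ++ arr.drop k),
       ((arr.take k).filter (fun x => x.isSome)).length) := by
  induction k with
  | zero => simp
  | succ k ih =>
    have hk' : k ≤ arr.length := Nat.le_of_succ_le hk
    have hklt : k < arr.length := hk
    have hFlen : ((arr.take k).filter (fun x => x.isSome)).length ≤ k := by
      calc ((arr.take k).filter (fun x => x.isSome)).length
          ≤ (arr.take k).length := List.length_filter_le _ _
        _ ≤ k := by simp
    have htake : arr.take (k + 1) = arr.take k ++ [arr[k]] := by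
      rw [List.take_add_one, List.getElem?_eq_getElem hklt]
      rfl
    have hdrop : arr.drop k = arr[k] :: arr.drop (k + 1) := List.drop_eq_getElem_cons hklt
    rw [List.range_succ, List.foldl_append, ih hk']
    simp only [List.foldl_cons, List.foldl_nil]
    rw [hdrop]
    have hshape := pvStepA_shape ((arr.take k).filter (fun x => x.isSome)) (arr.drop (k + 1))
      (k - ((arr.take k).filter (fun x => x.isSome)).length) k arr[k] (by omega)
    rw [hshape]
    rw [htake, List.filter_append]
    by_cases hx : (arr[k]).isSome
    · rw [if_pos hx]
      have hfx : [arr[k]].filter (fun x => x.isSome) = [arr[k]] := by simp [hx]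
      rw [hfx]
      have hcount : (k + 1) - (((arr.take k).filter (fun x => x.isSome)) ++ [arr[k]]).length
          = k - ((arr.take k).filter (fun x => x.isSome)).length := by simp
      rw [hcount]
      simp
    · rw [if_neg hx]
      have hfx : [arr[k]].filter (fun x => x.isSome) = [] := by
        have hxn : arr[k] = none := Option.not_isSome_iff_eq_none.mp (by simpa using hx)
        simp [hxn]
      rw [hfx, List.append_nil]
      have hcount : (k + 1) - ((arr.take k).filter (fun x => x.isSome)).length
          = (k - ((arr.take k).filter (fun x => x.isSome)).length) + 1 := by omega
      rw [hcount]

-- ===== VERDICT (by name: the statement is the Claim_ definition above) =====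
theorem move_none_to_end_spec : Claim_equal_move_none_to_end := by
  intro arr _
  show move_none_to_end arr = move_none_to_end_alt arr
  simp only [move_none_to_end, move_none_to_end_alt]
  rw [pv_loop_inv arr arr.length (le_refl _)]
  simp
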